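-- pv_equiv track=rewrite | github.com/Drozdova-Daria/intelligent_placer | intelligent_placer.py | get_extreme_points
-- ===== SOURCE A (Python) =====
-- def get_extreme_points(coordinates):
--     """
--     Find extreme points of the object
--     :param coordinates:
--     :return: top, left, right, bottom - extreme points of object
--     """
--     top = left = right = bottom = coordinates[0]
--
--     for coordinate in coordinates[1:]:
--         if coordinate[0] < left[0]:
--             left = coordinate
--         elif coordinate[0] > right[0]:
--             right = coordinate
--         if coordinate[1] < top[1]:
--             top = coordinate
--         elif coordinate[1] > bottom[1]:
--             bottom = coordinate
--
--     return top, left, right, bottom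
-- ===== SOURCE B (Python) =====
-- def get_extreme_points(coordinates):
--     """
--     Find extreme points of the object
--     :param coordinates:
--     :return: top, left, right, bottom - extreme points of object
--     """
--     left = min(coordinates, key=lambda c: c[0])
--     right = max(coordinates, key=lambda c: c[0])
--     top = min(coordinates, key=lambda c: c[1])
--     bottom = max(coordinates, key=lambda c: c[1])
--     return top, left, right, bottom
-- ===== Notes on version B (the rewrite author's own statement) =====
-- stated objective: idiomatic
-- what changed: Replaced the single fused loop with coupled elif-updates by four independent min/max calls with key functions, relying on Python min/max returning the first extremal element to preserve first-on-tie behaviour.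
import Mathlib
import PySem

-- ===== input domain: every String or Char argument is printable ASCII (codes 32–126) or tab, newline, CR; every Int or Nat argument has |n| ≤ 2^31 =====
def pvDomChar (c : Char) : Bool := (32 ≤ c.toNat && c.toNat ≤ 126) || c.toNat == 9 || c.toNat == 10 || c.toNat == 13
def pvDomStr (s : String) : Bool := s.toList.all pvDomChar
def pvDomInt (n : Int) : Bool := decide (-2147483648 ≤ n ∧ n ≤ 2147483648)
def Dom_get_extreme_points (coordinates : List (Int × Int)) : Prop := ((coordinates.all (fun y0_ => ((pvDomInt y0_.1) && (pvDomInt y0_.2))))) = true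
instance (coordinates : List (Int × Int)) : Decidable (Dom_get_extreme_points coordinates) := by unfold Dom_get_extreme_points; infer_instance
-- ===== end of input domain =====

-- B replaces A's single fused loop (with coupled elif updates) by four independent
-- first-extremal min/max scans with key functions; same O(n) cost, more idiomatic.
-- A raises IndexError on [] and B raises ValueError there, so Pre_ excludes the empty list.


-- ===== PORT A =====
-- A's loop state (top, left, right, bottom), updated exactly as the Python body does.
def pvStepA (st : (Int × Int) × (Int × Int) × (Int × Int) × (Int × Int)) (c : Int × Int) :
    (Int × Int) × (Int × Int) × (Int × Int) × (Int × Int) :=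
  let (top, left, right, bottom) := st
  let (left, right) :=
    if c.1 < left.1 then (c, right)
    else if c.1 > right.1 then (left, c)
    else (left, right)
  let (top, bottom) :=
    if c.2 < top.2 then (c, bottom)
    else if c.2 > bottom.2 then (top, c)
    else (top, bottom)
  (top, left, right, bottom)

def get_extreme_points (coordinates : List (Int × Int)) : List (Int × Int) :=
  match coordinates with
  | [] => []        -- Python raises IndexError here; excluded by Pre_
  | c0 :: _ =>
    let st := (PySem.List.slice coordinates (some 1) none).foldl pvStepA (c0, c0, c0, c0)
    [st.1, st.2.1, st.2.2.1, st.2.2.2]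

-- ===== PORT B =====
def get_extreme_points_alt (coordinates : List (Int × Int)) : List (Int × Int) :=
  match PySem.List.min? coordinates (fun c => c.1),
        PySem.List.max? coordinates (fun c => c.1),
        PySem.List.min? coordinates (fun c => c.2),
        PySem.List.max? coordinates (fun c => c.2) with
  | some left, some right, some top, some bottom => [top, left, right, bottom]
  | _, _, _, _ => []   -- Python raises ValueError here; excluded by Pre_

-- ===== PRECONDITION & SPEC =====
-- A raises IndexError on the empty list (coordinates[0]); excluded.
def Pre_get_extreme_points (coordinates : List (Int × Int)) : Prop := coordinates ≠ []
instance (coordinates : List (Int × Int)) : Decidable (Pre_get_extreme_points coordinates) := by unfold Pre_get_extreme_points; infer_instance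
def pvWitness_get_extreme_points : (List (Int × Int)) := [(1, 2), (0, 5)]
def Spec_get_extreme_points (coordinates : List (Int × Int)) (out : List (Int × Int)) : Prop := out = get_extreme_points_alt coordinates
instance (coordinates : List (Int × Int)) (out : List (Int × Int)) : Decidable (Spec_get_extreme_points coordinates out) := by unfold Spec_get_extreme_points; infer_instance

-- ===== CLAIM (what is proved, stated in full; the proofs are below) =====
def Claim_equal_get_extreme_points : Prop := ∀ (coordinates : List (Int × Int)), Dom_get_extreme_points coordinates → Pre_get_extreme_points coordinates → Spec_get_extreme_points coordinates (get_extreme_points coordinates)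

-- ===== LEMMAS AND PROOFS =====

-- first-minimum / first-maximum running folds
def pvMinF (key : Int × Int → Int) (m c : Int × Int) : Int × Int := if key c < key m then c else m
def pvMaxF (key : Int × Int → Int) (m c : Int × Int) : Int × Int := if key m < key c then c else m

lemma min?_cons_foldl (key : Int × Int → Int) (c0 : Int × Int) (rest : List (Int × Int)) :
    PySem.List.min? (c0 :: rest) key = some (rest.foldl (pvMinF key) c0) := by
  show List.foldl _ (some c0) rest = _
  induction rest generalizing c0 with
  | nil => rfl
  | cons x t ih =>
    simp only [List.foldl_cons, pvMinF]
    split_ifs <;> exact ih _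

lemma max?_cons_foldl (key : Int × Int → Int) (c0 : Int × Int) (rest : List (Int × Int)) :
    PySem.List.max? (c0 :: rest) key = some (rest.foldl (pvMaxF key) c0) := by
  show List.foldl _ (some c0) rest = _
  induction rest generalizing c0 with
  | nil => rfl
  | cons x t ih =>
    simp only [List.foldl_cons, pvMaxF]
    split_ifs <;> exact ih _

-- A's fused loop computes, componentwise, the four independent extremal folds,
-- provided left ≤ right on x and top ≤ bottom on y (which the initial state satisfies).
lemma fused_eq_components (rest : List (Int × Int))
    (t l r b : Int × Int) (hlr : l.1 ≤ r.1) (htb : t.2 ≤ b.2) :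
    rest.foldl pvStepA (t, l, r, b) =
      (rest.foldl (pvMinF (fun c => c.2)) t,
       rest.foldl (pvMinF (fun c => c.1)) l,
       rest.foldl (pvMaxF (fun c => c.1)) r,
       rest.foldl (pvMaxF (fun c => c.2)) b) := by
  induction rest generalizing t l r b with
  | nil => rfl
  | cons c cs ih =>
    simp only [List.foldl_cons]
    have hstep : pvStepA (t, l, r, b) c =
        (pvMinF (fun c => c.2) t c, pvMinF (fun c => c.1) l c,
         pvMaxF (fun c => c.1) r c, pvMaxF (fun c => c.2) b c) := by
      simp only [pvStepA, pvMinF, pvMaxF]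
      split_ifs <;> simp_all <;> omega
    rw [hstep]
    apply ih
    · simp only [pvMinF, pvMaxF]; split_ifs <;> omega
    · simp only [pvMinF, pvMaxF]; split_ifs <;> omega

-- ===== VERDICT (by name: the statement is the Claim_ definition above) =====
theorem get_extreme_points_spec : Claim_equal_get_extreme_points := by
  intro coordinates _ hpre
  unfold Spec_get_extreme_points
  match coordinates with
  | [] => exact absurd rfl hpre
  | c0 :: rest =>
    show ([_, _, _, _] : List (Int × Int)) = _
    rw [show PySem.List.slice (c0 :: rest) (some 1) none = rest from by
      simp [PySem.List.slice_some_none, PySem.List.clampIdx]]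
    rw [fused_eq_components rest c0 c0 c0 c0 le_rfl le_rfl]
    unfold get_extreme_points_alt
    rw [min?_cons_foldl, max?_cons_foldl, min?_cons_foldl, max?_cons_foldl]
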